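-- pv_equiv track=rewrite | github.com/BIGtigr/xgcode | 20110331a.py | is_sign_harmonic
-- ===== SOURCE A (Python) =====
-- def get_leaf_set(id_to_adj):
--     return set(v for v, d in id_to_adj.items() if len(d) == 1)
--
-- def is_sign_harmonic(id_to_adj, id_to_val):
--     """
--     Sign harmonic will mean that each strong sign graph has a leaf.
--     Assume all values are either +1 or -1.
--     @param id_to_adj: maps an id to a list of adjacent ids
--     @param id_to_val: maps an id to a value
--     """
--     leaves = get_leaf_set(id_to_adj)
--     visited = set(leaves)
--     shell = set(leaves)
--     while shell:
--         next_shell = set()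
--         for v in shell:
--             v_val = id_to_val[v]
--             for u in id_to_adj[v]:
--                 if u not in visited:
--                     u_val = id_to_val[u]
--                     if u_val == v_val:
--                         visited.add(u)
--                         next_shell.add(u)
--         shell = next_shell
--     nvertices = len(id_to_adj)
--     nvisited = len(visited)
--     return nvertices == nvisited
-- ===== SOURCE B (Python) =====
-- def is_sign_harmonic(id_to_adj, id_to_val):
--     good = {v for v, adj in id_to_adj.items() if len(adj) == 1}
--     for _ in range(len(id_to_adj)):
--         bigger = good | {u for v, adj in id_to_adj.items() if v in good
--                            for u in adj if id_to_val[u] == id_to_val[v]}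
--         if bigger == good:
--             break
--         good = bigger
--     return len(good) == len(id_to_adj)
-- ===== Notes on version B (the rewrite author's own statement) =====
-- stated objective: simpler
-- what changed: Replaced A's leaf-seeded frontier BFS (visited set plus shell/next_shell expansion) by a fixpoint iteration: repeated full passes over all adjacency entries that add every same-value neighbour of the current good set, stopping when a pass adds nothing, then a size comparison.
-- outside the precondition, e.g. on is_sign_harmonic({0: [5]}, {0: 1, 5: 2}): A returns True, B returns True; on is_sign_harmonic({0: [1], 1: [0], 2: []}, {0: 1, 1: 1}): A returns False, B returns False
import Mathlib
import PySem

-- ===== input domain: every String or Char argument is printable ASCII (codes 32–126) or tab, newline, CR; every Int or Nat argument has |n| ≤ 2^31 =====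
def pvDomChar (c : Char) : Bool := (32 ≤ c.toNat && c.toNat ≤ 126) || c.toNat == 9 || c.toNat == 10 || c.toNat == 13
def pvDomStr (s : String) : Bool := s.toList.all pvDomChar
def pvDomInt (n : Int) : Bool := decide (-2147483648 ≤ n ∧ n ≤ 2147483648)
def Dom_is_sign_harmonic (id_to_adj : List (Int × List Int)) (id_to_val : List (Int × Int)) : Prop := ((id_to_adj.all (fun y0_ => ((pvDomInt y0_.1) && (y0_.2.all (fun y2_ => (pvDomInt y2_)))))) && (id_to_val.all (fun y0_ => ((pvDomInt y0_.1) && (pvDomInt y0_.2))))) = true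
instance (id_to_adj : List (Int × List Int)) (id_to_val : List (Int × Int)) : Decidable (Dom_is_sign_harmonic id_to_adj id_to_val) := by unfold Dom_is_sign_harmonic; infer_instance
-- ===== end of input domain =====

-- B replaces A's leaf-seeded frontier BFS by a fixpoint iteration of full edge scans that stops when a pass
-- adds nothing (objective: simpler, not faster). Return values only; neither version mutates its arguments.

-- ===== PORT A =====
-- while shell: one recursive call per iteration of A's while-loop; the fuel (length + 2) is a pure
-- termination guard — inside Pre_ the shell empties before it is exhausted (proved below).
def pvALoop (adjL : List (Int × List Int)) (valL : List (Int × Int))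
    (visited shell : List Int) : Nat → List Int
  | 0 => visited
  | fuel+1 =>
    if shell = [] then visited
    else
      let st := shell.foldl (fun (s : List Int × List Int) v =>
        let vval := (valL.lookup v).getD 0
        (((adjL.lookup v).getD []).foldl (fun (s : List Int × List Int) u =>
          if s.1.contains u then s
          else if (valL.lookup u).getD 0 == vval then (PySem.Set.add s.1 u, PySem.Set.add s.2 u)
          else s) s)) (visited, [])
      pvALoop adjL valL st.1 st.2 fuel

def is_sign_harmonic (id_to_adj : List (Int × List Int)) (id_to_val : List (Int × Int)) : Bool :=
  let leaves := PySem.Set.ofList ((id_to_adj.filter (fun p => p.2.length == 1)).map Prod.fst)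
  let visited := pvALoop id_to_adj id_to_val leaves leaves (id_to_adj.length + 2)
  id_to_adj.length == visited.length

-- ===== PORT B =====
-- bigger = good | {u for v, adj in items if v in good for u in adj if val[u] == val[v]}
def pvBRound (adjL : List (Int × List Int)) (valL : List (Int × Int)) (good : List Int) : List Int :=
  adjL.foldl (fun g p =>
    if good.contains p.1 then
      p.2.foldl (fun g u =>
        if (valL.lookup u).getD 0 == (valL.lookup p.1).getD 0 then PySem.Set.add g u else g) g
    else g) good

-- the for-loop with its break: one recursive call per pass, at most len(id_to_adj) passes
def pvBLoop (adjL : List (Int × List Int)) (valL : List (Int × Int)) (good : List Int) : Nat → List Int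
  | 0 => good
  | fuel+1 =>
    let bigger := pvBRound adjL valL good
    if PySem.Set.equal bigger good then good
    else pvBLoop adjL valL bigger fuel

def is_sign_harmonic_alt (id_to_adj : List (Int × List Int)) (id_to_val : List (Int × Int)) : Bool :=
  let good0 := PySem.Set.ofList ((id_to_adj.filter (fun p => p.2.length == 1)).map Prod.fst)
  let good := pvBLoop id_to_adj id_to_val good0 id_to_adj.length
  good.length == id_to_adj.length

-- ===== PRECONDITION & SPEC =====
-- Pre_ admits inputs with unique adjacency keys (a Python dict has them) that are either leafless —
-- no adjacency list has length 1, so A looks nothing up and returns at once — or well-formed graph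
-- dictionaries: every vertex carries a value and every listed neighbour is itself a vertex.  Outside
-- Pre_ A can raise KeyError; on some remaining ill-formed inputs A still returns (a missing vertex that
-- no leaf happens to reach) — those are excluded as outside the natural domain, see claim.json "cites".
def Pre_is_sign_harmonic (id_to_adj : List (Int × List Int)) (id_to_val : List (Int × Int)) : Prop :=
  (id_to_adj.map Prod.fst).Nodup ∧
  ((∀ p ∈ id_to_adj, p.2.length ≠ 1) ∨
    ∀ p ∈ id_to_adj, p.1 ∈ id_to_val.map Prod.fst ∧
      ∀ u ∈ p.2, u ∈ id_to_val.map Prod.fst ∧ u ∈ id_to_adj.map Prod.fst)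

instance (id_to_adj : List (Int × List Int)) (id_to_val : List (Int × Int)) : Decidable (Pre_is_sign_harmonic id_to_adj id_to_val) := by unfold Pre_is_sign_harmonic; infer_instance

def pvWitness_is_sign_harmonic : (List (Int × List Int)) × (List (Int × Int)) :=
  ([(0, [1]), (1, [0]), (2, [0, 1])], [(0, 1), (1, 1), (2, -1)])

def Spec_is_sign_harmonic (id_to_adj : List (Int × List Int)) (id_to_val : List (Int × Int)) (out : Bool) : Prop := out = is_sign_harmonic_alt id_to_adj id_to_val
instance (id_to_adj : List (Int × List Int)) (id_to_val : List (Int × Int)) (out : Bool) : Decidable (Spec_is_sign_harmonic id_to_adj id_to_val out) := by unfold Spec_is_sign_harmonic; infer_instance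

-- ===== CLAIM (what is proved, stated in full; the proofs are below) =====
def Claim_equal_is_sign_harmonic : Prop := ∀ (id_to_adj : List (Int × List Int)) (id_to_val : List (Int × Int)), Dom_is_sign_harmonic id_to_adj id_to_val → Pre_is_sign_harmonic id_to_adj id_to_val → Spec_is_sign_harmonic id_to_adj id_to_val (is_sign_harmonic id_to_adj id_to_val)

-- ===== LEMMAS AND PROOFS =====

-- Abstract model: everything is phrased over Finsets of vertices.
def pvVal (valL : List (Int × Int)) (v : Int) : Int := (valL.lookup v).getD 0
def pvAdj (adjL : List (Int × List Int)) (v : Int) : List Int := (adjL.lookup v).getD []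
def pvKeys (adjL : List (Int × List Int)) : Finset Int := (adjL.map Prod.fst).toFinset
-- same-value out-neighbours of v
def pvOkn (adjL : List (Int × List Int)) (valL : List (Int × Int)) (v : Int) : Finset Int :=
  ((pvAdj adjL v).filter (fun u => pvVal valL u == pvVal valL v)).toFinset
def pvImg (adjL : List (Int × List Int)) (valL : List (Int × Int)) (S : Finset Int) : Finset Int :=
  S.biUnion (pvOkn adjL valL)
def pvStep (adjL : List (Int × List Int)) (valL : List (Int × Int)) (S : Finset Int) : Finset Int :=
  S ∪ pvImg adjL valL S
def pvLv (adjL : List (Int × List Int)) : Finset Int :=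
  ((adjL.filter (fun p => p.2.length == 1)).map Prod.fst).toFinset
def pvCF (adjL : List (Int × List Int)) (valL : List (Int × Int)) : Finset Int :=
  (pvStep adjL valL)^[adjL.length] (pvLv adjL)

-- ---- generic association-list lookup facts ----
theorem pvLookup_mem {β : Type} (k : Int) (v : β) : ∀ (l : List (Int × β)), l.lookup k = some v → (k, v) ∈ l := by
  intro l h
  induction l with
  | nil => simp [List.lookup] at h
  | cons p t ih =>
    obtain ⟨a, b⟩ := p
    rw [List.lookup_cons] at h
    by_cases hk : k = a
    · subst hk
      simp at h
      subst h; exact List.mem_cons_self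
    · rw [show (k == a) = false from beq_eq_false_iff_ne.mpr hk] at h
      exact List.mem_cons_of_mem _ (ih h)

theorem pvLookup_of_mem_nodup {β : Type} (l : List (Int × β)) (p : Int × β)
    (hnd : (l.map Prod.fst).Nodup) (hp : p ∈ l) : l.lookup p.1 = some p.2 := by
  induction l with
  | nil => simp at hp
  | cons q t ih =>
    simp only [List.map_cons, List.nodup_cons] at hnd
    rcases List.mem_cons.mp hp with hp | hp
    · subst hp; rw [List.lookup_cons]; simp
    · rw [List.lookup_cons]
      have hne : p.1 ≠ q.1 := by
        intro h
        exact hnd.1 (h ▸ (List.mem_map.mpr ⟨p, hp, rfl⟩))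
      rw [show (p.1 == q.1) = false from beq_eq_false_iff_ne.mpr hne]
      exact ih hnd.2 hp

-- ---- PySem.Set.add as a Finset insert ----
theorem pvToFinset_add (s : List Int) (x : Int) :
    (PySem.Set.add s x).toFinset = insert x s.toFinset := by
  ext y; simp [PySem.Set.mem_add, or_comm]

-- ---- basic facts about the abstract step ----
theorem pvImg_mono (adjL : List (Int × List Int)) (valL : List (Int × Int))
    {S T : Finset Int} (h : S ⊆ T) : pvImg adjL valL S ⊆ pvImg adjL valL T :=
  Finset.biUnion_subset_biUnion_of_subset_left _ h

theorem pvSubset_step (adjL : List (Int × List Int)) (valL : List (Int × Int)) (S : Finset Int) :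
    S ⊆ pvStep adjL valL S := Finset.subset_union_left

theorem pvIter_le_closed (adjL : List (Int × List Int)) (valL : List (Int × Int))
    (T : Finset Int) (hT : pvImg adjL valL T ⊆ T) (hlv : pvLv adjL ⊆ T) :
    ∀ k, (pvStep adjL valL)^[k] (pvLv adjL) ⊆ T := by
  intro k
  induction k with
  | zero => simpa using hlv
  | succ k ih =>
    rw [Function.iterate_succ_apply']
    apply Finset.union_subset ih
    exact (pvImg_mono adjL valL ih).trans hT

theorem pvAdj_mem_keys (adjL : List (Int × List Int))
    (hpre : ∀ p ∈ adjL, ∀ u ∈ p.2, u ∈ adjL.map Prod.fst)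
    {v x : Int} (hx : x ∈ pvAdj adjL v) : x ∈ pvKeys adjL := by
  unfold pvAdj at hx
  rcases h : adjL.lookup v with _ | l
  · rw [h] at hx; simp at hx
  · rw [h] at hx
    have hm : (v, l) ∈ adjL := pvLookup_mem v l adjL h
    simp only [pvKeys, List.mem_toFinset]
    exact hpre _ hm x hx

theorem pvImg_subset_keys (adjL : List (Int × List Int)) (valL : List (Int × Int))
    (hpre : ∀ p ∈ adjL, ∀ u ∈ p.2, u ∈ adjL.map Prod.fst)
    (S : Finset Int) : pvImg adjL valL S ⊆ pvKeys adjL := by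
  intro x hx
  rcases Finset.mem_biUnion.mp hx with ⟨v, _, hv⟩
  simp only [pvOkn, List.mem_toFinset, List.mem_filter] at hv
  exact pvAdj_mem_keys adjL hpre hv.1

theorem pvLv_subset_keys (adjL : List (Int × List Int)) : pvLv adjL ⊆ pvKeys adjL := by
  intro x hx
  simp only [pvLv, List.mem_toFinset, List.mem_map] at hx
  rcases hx with ⟨p, hp, rfl⟩
  simp only [pvKeys, List.mem_toFinset]
  exact List.mem_map.mpr ⟨p, (List.mem_filter.mp hp).1, rfl⟩

theorem pvCF_subset_keys (adjL : List (Int × List Int)) (valL : List (Int × Int))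
    (hpre : ∀ p ∈ adjL, ∀ u ∈ p.2, u ∈ adjL.map Prod.fst) :
    pvCF adjL valL ⊆ pvKeys adjL :=
  pvIter_le_closed adjL valL _ (pvImg_subset_keys adjL valL hpre _) (pvLv_subset_keys adjL) _

theorem pvIter_chain (adjL : List (Int × List Int)) (valL : List (Int × Int)) (k : Nat) :
    (pvStep adjL valL)^[k] (pvLv adjL) ⊆ (pvStep adjL valL)^[k + 1] (pvLv adjL) := by
  rw [Function.iterate_succ_apply']
  exact pvSubset_step adjL valL _

theorem pvLv_subset_CF (adjL : List (Int × List Int)) (valL : List (Int × Int)) :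
    pvLv adjL ⊆ pvCF adjL valL := by
  unfold pvCF
  induction adjL.length with
  | zero => simp
  | succ k ih => exact ih.trans (pvIter_chain adjL valL k)

theorem pvStab (adjL : List (Int × List Int)) (valL : List (Int × Int)) :
    ∀ k, (pvStep adjL valL)^[k + 1] (pvLv adjL) = (pvStep adjL valL)^[k] (pvLv adjL) ∨
      k ≤ ((pvStep adjL valL)^[k] (pvLv adjL)).card := by
  intro k
  induction k with
  | zero => right; omega
  | succ k ih =>
    rcases ih with h | h
    · left
      rw [Function.iterate_succ_apply', h]
      exact (Function.iterate_succ_apply' _ _ _).symm.trans h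
    · by_cases heq : (pvStep adjL valL)^[k + 1] (pvLv adjL) = (pvStep adjL valL)^[k] (pvLv adjL)
      · left
        rw [Function.iterate_succ_apply', heq]
        exact (Function.iterate_succ_apply' _ _ _).symm.trans heq
      · right
        have hss : (pvStep adjL valL)^[k] (pvLv adjL) ⊂ (pvStep adjL valL)^[k + 1] (pvLv adjL) :=
          (Finset.ssubset_iff_subset_ne).mpr ⟨pvIter_chain adjL valL k, fun hh => heq hh.symm⟩
        have := Finset.card_lt_card hss
        omega

theorem pvStep_CF_eq (adjL : List (Int × List Int)) (valL : List (Int × Int))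
    (hpre : ∀ p ∈ adjL, ∀ u ∈ p.2, u ∈ adjL.map Prod.fst) :
    pvStep adjL valL (pvCF adjL valL) = pvCF adjL valL := by
  rcases pvStab adjL valL adjL.length with h | h
  · calc pvStep adjL valL (pvCF adjL valL)
        = (pvStep adjL valL)^[adjL.length + 1] (pvLv adjL) := (Function.iterate_succ_apply' _ _ _).symm
      _ = pvCF adjL valL := h
  · have hkeys : pvKeys adjL ⊆ pvCF adjL valL := by
      apply Finset.subset_of_eq
      refine (Finset.eq_of_subset_of_card_le (pvCF_subset_keys adjL valL hpre) ?_).symm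
      have h1 : (pvKeys adjL).card ≤ adjL.length := by
        calc (pvKeys adjL).card ≤ (adjL.map Prod.fst).length := List.toFinset_card_le _
          _ = adjL.length := List.length_map ..
      have h2 : (pvCF adjL valL).card = ((pvStep adjL valL)^[adjL.length] (pvLv adjL)).card := rfl
      omega
    have hCK : pvCF adjL valL = pvKeys adjL :=
      Finset.Subset.antisymm (pvCF_subset_keys adjL valL hpre) hkeys
    rw [pvStep, hCK]
    rw [Finset.union_eq_left]
    exact pvImg_subset_keys adjL valL hpre _

theorem pvCF_min (adjL : List (Int × List Int)) (valL : List (Int × Int))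
    (T : Finset Int) (hT : pvImg adjL valL T ⊆ T) (hlv : pvLv adjL ⊆ T) :
    pvCF adjL valL ⊆ T := pvIter_le_closed adjL valL T hT hlv _

-- ---- A's round: the nested fold over the shell ----
theorem pvInnerA (valL : List (Int × Int)) (vval : Int) (V0 : Finset Int) :
    ∀ (us : List Int) (vis ns : List Int), vis.Nodup → ns.Nodup →
      V0 ⊆ vis.toFinset → ns.toFinset = vis.toFinset \ V0 →
      ((us.foldl (fun (s : List Int × List Int) u =>
          if s.1.contains u then s
          else if (valL.lookup u).getD 0 == vval then (PySem.Set.add s.1 u, PySem.Set.add s.2 u)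
          else s) (vis, ns)).1.toFinset
        = vis.toFinset ∪ (us.filter (fun u => (valL.lookup u).getD 0 == vval)).toFinset) ∧
      ((us.foldl (fun (s : List Int × List Int) u =>
          if s.1.contains u then s
          else if (valL.lookup u).getD 0 == vval then (PySem.Set.add s.1 u, PySem.Set.add s.2 u)
          else s) (vis, ns)).2.toFinset
        = (us.foldl (fun (s : List Int × List Int) u =>
          if s.1.contains u then s
          else if (valL.lookup u).getD 0 == vval then (PySem.Set.add s.1 u, PySem.Set.add s.2 u)
          else s) (vis, ns)).1.toFinset \ V0) ∧
      (us.foldl (fun (s : List Int × List Int) u =>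
          if s.1.contains u then s
          else if (valL.lookup u).getD 0 == vval then (PySem.Set.add s.1 u, PySem.Set.add s.2 u)
          else s) (vis, ns)).1.Nodup ∧
      (us.foldl (fun (s : List Int × List Int) u =>
          if s.1.contains u then s
          else if (valL.lookup u).getD 0 == vval then (PySem.Set.add s.1 u, PySem.Set.add s.2 u)
          else s) (vis, ns)).2.Nodup := by
  intro us
  induction us with
  | nil =>
    intro vis ns h1 h2 h3 h4
    refine ⟨by simp, by simpa using h4, h1, h2⟩
  | cons u us ih =>
    intro vis ns h1 h2 h3 h4
    simp only [List.foldl_cons]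
    by_cases hc : vis.contains u
    · rw [if_pos hc]
      obtain ⟨c1, c2, c3, c4⟩ := ih vis ns h1 h2 h3 h4
      refine ⟨?_, c2, c3, c4⟩
      rw [c1]
      have hu : u ∈ vis.toFinset := by simpa using hc
      ext x
      by_cases hpred : ((valL.lookup u).getD 0 == vval) = true
      all_goals
        simp only [List.filter_cons, hpred, if_true]
        by_cases hx : x = u <;> simp_all
    · rw [if_neg hc]
      have hunv : u ∉ vis.toFinset := by simpa using hc
      by_cases hpred : ((valL.lookup u).getD 0 == vval) = true
      · rw [if_pos hpred]
        have hnv0 : u ∉ V0 := fun hh => hunv (h3 hh)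
        obtain ⟨c1, c2, c3, c4⟩ := ih (PySem.Set.add vis u) (PySem.Set.add ns u)
          (PySem.Set.nodup_add vis u h1) (PySem.Set.nodup_add ns u h2)
          (by rw [pvToFinset_add]; exact h3.trans (Finset.subset_insert _ _))
          (by rw [pvToFinset_add, pvToFinset_add, h4, Finset.insert_sdiff_of_notMem _ hnv0])
        refine ⟨?_, c2, c3, c4⟩
        rw [c1, pvToFinset_add, List.filter_cons, if_pos hpred]
        ext x; by_cases hx : x = u <;> simp [hx]
      · rw [if_neg hpred]
        obtain ⟨c1, c2, c3, c4⟩ := ih vis ns h1 h2 h3 h4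
        refine ⟨?_, c2, c3, c4⟩
        rw [c1, List.filter_cons, if_neg hpred]

theorem pvOuterA (adjL : List (Int × List Int)) (valL : List (Int × Int)) (V0 : Finset Int) :
    ∀ (sh vis ns : List Int), vis.Nodup → ns.Nodup →
      V0 ⊆ vis.toFinset → ns.toFinset = vis.toFinset \ V0 →
      ((sh.foldl (fun (s : List Int × List Int) v =>
          let vval := (valL.lookup v).getD 0
          (((adjL.lookup v).getD []).foldl (fun (s : List Int × List Int) u =>
            if s.1.contains u then s
            else if (valL.lookup u).getD 0 == vval then (PySem.Set.add s.1 u, PySem.Set.add s.2 u)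
            else s) s)) (vis, ns)).1.toFinset
        = vis.toFinset ∪ pvImg adjL valL sh.toFinset) ∧
      ((sh.foldl (fun (s : List Int × List Int) v =>
          let vval := (valL.lookup v).getD 0
          (((adjL.lookup v).getD []).foldl (fun (s : List Int × List Int) u =>
            if s.1.contains u then s
            else if (valL.lookup u).getD 0 == vval then (PySem.Set.add s.1 u, PySem.Set.add s.2 u)
            else s) s)) (vis, ns)).2.toFinset
        = (sh.foldl (fun (s : List Int × List Int) v =>
          let vval := (valL.lookup v).getD 0
          (((adjL.lookup v).getD []).foldl (fun (s : List Int × List Int) u =>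
            if s.1.contains u then s
            else if (valL.lookup u).getD 0 == vval then (PySem.Set.add s.1 u, PySem.Set.add s.2 u)
            else s) s)) (vis, ns)).1.toFinset \ V0) ∧
      (sh.foldl (fun (s : List Int × List Int) v =>
          let vval := (valL.lookup v).getD 0
          (((adjL.lookup v).getD []).foldl (fun (s : List Int × List Int) u =>
            if s.1.contains u then s
            else if (valL.lookup u).getD 0 == vval then (PySem.Set.add s.1 u, PySem.Set.add s.2 u)
            else s) s)) (vis, ns)).1.Nodup ∧
      (sh.foldl (fun (s : List Int × List Int) v =>
          let vval := (valL.lookup v).getD 0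
          (((adjL.lookup v).getD []).foldl (fun (s : List Int × List Int) u =>
            if s.1.contains u then s
            else if (valL.lookup u).getD 0 == vval then (PySem.Set.add s.1 u, PySem.Set.add s.2 u)
            else s) s)) (vis, ns)).2.Nodup := by
  intro sh
  induction sh with
  | nil =>
    intro vis ns h1 h2 h3 h4
    refine ⟨by simp [pvImg], by simpa using h4, h1, h2⟩
  | cons v sh ih =>
    intro vis ns h1 h2 h3 h4
    simp only [List.foldl_cons]
    obtain ⟨c1, c2, c3, c4⟩ := pvInnerA valL ((valL.lookup v).getD 0) V0
      ((adjL.lookup v).getD []) vis ns h1 h2 h3 h4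
    have hokn : (((adjL.lookup v).getD []).filter
        (fun u => (valL.lookup u).getD 0 == (valL.lookup v).getD 0)).toFinset
        = pvOkn adjL valL v := rfl
    obtain ⟨d1, d2, d3, d4⟩ := ih _ _ c3 c4
      (h3.trans (by rw [c1]; exact Finset.subset_union_left)) c2
    refine ⟨?_, d2, d3, d4⟩
    rw [d1, c1, hokn]
    have hvs : (v :: sh).toFinset = insert v sh.toFinset := by simp
    rw [hvs]
    simp only [pvImg, Finset.biUnion_insert, Finset.union_assoc]

theorem pvALoop_nil (adjL : List (Int × List Int)) (valL : List (Int × Int))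
    (vis : List Int) (fuel : Nat) : pvALoop adjL valL vis [] fuel = vis := by
  cases fuel <;> simp [pvALoop]

theorem pvExit (adjL : List (Int × List Int)) (valL : List (Int × Int)) (V : Finset Int)
    (hlv : pvLv adjL ⊆ V) (hcf : V ⊆ pvCF adjL valL)
    (hcl : pvStep adjL valL V ⊆ V) : V = pvCF adjL valL :=
  Finset.Subset.antisymm hcf
    (pvCF_min adjL valL V ((Finset.subset_union_right).trans hcl) hlv)

theorem pvALoop_eq (adjL : List (Int × List Int)) (valL : List (Int × Int))
    (hpre : ∀ p ∈ adjL, ∀ u ∈ p.2, u ∈ adjL.map Prod.fst) :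
    ∀ (fuel : Nat) (vis shell : List Int), vis.Nodup →
      shell.toFinset ⊆ vis.toFinset → pvLv adjL ⊆ vis.toFinset →
      vis.toFinset ⊆ pvCF adjL valL →
      pvStep adjL valL vis.toFinset ⊆ vis.toFinset ∪ pvImg adjL valL shell.toFinset →
      (shell ≠ [] → (pvCF adjL valL).card + 2 ≤ fuel + vis.toFinset.card) →
      (pvALoop adjL valL vis shell fuel).toFinset = pvCF adjL valL ∧
      (pvALoop adjL valL vis shell fuel).Nodup := by
  intro fuel
  induction fuel with
  | zero =>
    intro vis shell h1 h2 h3 h4 h5 h6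
    by_cases hne : shell = []
    · subst hne
      simp only [List.toFinset_nil, pvImg, Finset.biUnion_empty, Finset.union_empty] at h5
      exact ⟨pvExit adjL valL vis.toFinset h3 h4 h5, h1⟩
    · have hc := Finset.card_le_card h4
      have := h6 hne
      omega
  | succ fuel ih =>
    intro vis shell h1 h2 h3 h4 h5 h6
    by_cases hne : shell = []
    · subst hne
      rw [pvALoop_nil]
      simp only [List.toFinset_nil, pvImg, Finset.biUnion_empty, Finset.union_empty] at h5
      exact ⟨pvExit adjL valL vis.toFinset h3 h4 h5, h1⟩
    · simp only [pvALoop]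
      rw [if_neg hne]
      obtain ⟨c1, c2, c3, c4⟩ := pvOuterA adjL valL vis.toFinset shell vis []
        h1 (by simp) (Finset.Subset.refl _) (by simp)
      set st := shell.foldl (fun (s : List Int × List Int) v =>
          let vval := (valL.lookup v).getD 0
          (((adjL.lookup v).getD []).foldl (fun (s : List Int × List Int) u =>
            if s.1.contains u then s
            else if (valL.lookup u).getD 0 == vval then (PySem.Set.add s.1 u, PySem.Set.add s.2 u)
            else s) s)) (vis, []) with hst
      have hVsub : vis.toFinset ⊆ st.1.toFinset := by
        rw [c1]; exact Finset.subset_union_left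
      have hV'cf : st.1.toFinset ⊆ pvCF adjL valL := by
        rw [c1]
        apply Finset.union_subset h4
        calc pvImg adjL valL shell.toFinset
            ⊆ pvImg adjL valL (pvCF adjL valL) := pvImg_mono adjL valL (h2.trans h4)
          _ ⊆ pvStep adjL valL (pvCF adjL valL) := Finset.subset_union_right
          _ = pvCF adjL valL := pvStep_CF_eq adjL valL hpre
      have hlv' : pvLv adjL ⊆ st.1.toFinset := h3.trans hVsub
      by_cases hemp : st.2 = []
      · rw [hemp, pvALoop_nil]
        have hVeq : st.1.toFinset = vis.toFinset := by
          have : st.1.toFinset \ vis.toFinset = ∅ := by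
            rw [← c2, hemp]; simp
          have hsub : st.1.toFinset ⊆ vis.toFinset := by
            intro x hx
            by_contra hxv
            exact (Finset.notMem_empty x) (this ▸ Finset.mem_sdiff.mpr ⟨hx, hxv⟩)
          exact Finset.Subset.antisymm hsub hVsub
        have hcl : pvStep adjL valL vis.toFinset ⊆ vis.toFinset := by
          intro x hx
          have := h5 hx
          rw [← c1, hVeq] at this
          exact this
        exact ⟨hVeq.trans (pvExit adjL valL vis.toFinset h3 h4 hcl), c3⟩
      · apply ih st.1 st.2 c3
        · rw [c2]; exact Finset.sdiff_subset
        · exact hlv'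
        · exact hV'cf
        · -- closure is pushed one round forward
          intro x hx
          rcases Finset.mem_union.mp hx with hx | hx
          · exact Finset.mem_union_left _ hx
          · rcases Finset.mem_biUnion.mp hx with ⟨v, hv, hxv⟩
            rw [c1] at hv
            by_cases hvV : v ∈ vis.toFinset
            · have : x ∈ pvStep adjL valL vis.toFinset :=
                Finset.mem_union_right _ (Finset.mem_biUnion.mpr ⟨v, hvV, hxv⟩)
              have := h5 this
              rw [← c1] at this
              exact Finset.mem_union_left _ this
            · have hvN : v ∈ st.2.toFinset := by
                rw [c2, c1]
                exact Finset.mem_sdiff.mpr ⟨hv, hvV⟩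
              exact Finset.mem_union_right _ (Finset.mem_biUnion.mpr ⟨v, hvN, hxv⟩)
        · intro _
          obtain ⟨y, hy⟩ := List.exists_mem_of_ne_nil st.2 hemp
          have hyN : y ∈ st.1.toFinset \ vis.toFinset := by
            rw [← c2]; simpa using hy
          have hcard : vis.toFinset.card < st.1.toFinset.card := by
            apply Finset.card_lt_card
            refine ⟨hVsub, fun hsub => ?_⟩
            rcases Finset.mem_sdiff.mp hyN with ⟨hy1, hy2⟩
            exact hy2 (hsub hy1)
          have := h6 hne
          omega

-- ---- B's round: one full pass over all adjacency entries ----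
theorem pvFoldAddFilter (f : Int → Bool) :
    ∀ (us : List Int) (g : List Int), g.Nodup →
      ((us.foldl (fun g u => if f u then PySem.Set.add g u else g) g).toFinset
        = g.toFinset ∪ (us.filter f).toFinset) ∧
      (us.foldl (fun g u => if f u then PySem.Set.add g u else g) g).Nodup := by
  intro us
  induction us with
  | nil => intro g hg; exact ⟨by simp, hg⟩
  | cons u us ih =>
    intro g hg
    simp only [List.foldl_cons]
    by_cases hf : f u
    · rw [if_pos hf]
      obtain ⟨c1, c2⟩ := ih (PySem.Set.add g u) (PySem.Set.nodup_add g u hg)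
      refine ⟨?_, c2⟩
      rw [c1, pvToFinset_add, List.filter_cons, if_pos hf]
      ext x; by_cases hx : x = u <;> simp [hx]
    · rw [if_neg hf]
      obtain ⟨c1, c2⟩ := ih g hg
      rw [List.filter_cons, if_neg hf]
      exact ⟨c1, c2⟩

theorem pvBRoundAux (valL : List (Int × Int)) (good : List Int) :
    ∀ (l : List (Int × List Int)) (g : List Int), g.Nodup →
      (∀ x : Int, x ∈ (l.foldl (fun g p =>
          if good.contains p.1 then
            p.2.foldl (fun g u =>
              if (valL.lookup u).getD 0 == (valL.lookup p.1).getD 0 then PySem.Set.add g u else g) g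
          else g) g).toFinset ↔
        x ∈ g.toFinset ∨ ∃ p ∈ l, p.1 ∈ good ∧ x ∈ p.2 ∧
          ((valL.lookup x).getD 0 == (valL.lookup p.1).getD 0) = true) ∧
      (l.foldl (fun g p =>
          if good.contains p.1 then
            p.2.foldl (fun g u =>
              if (valL.lookup u).getD 0 == (valL.lookup p.1).getD 0 then PySem.Set.add g u else g) g
          else g) g).Nodup := by
  intro l
  induction l with
  | nil => intro g hg; exact ⟨by simp, hg⟩
  | cons p l ih =>
    intro g hg
    simp only [List.foldl_cons]
    by_cases hc : good.contains p.1
    · rw [if_pos hc]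
      have hcm : p.1 ∈ good := by simpa using hc
      obtain ⟨f1, f2⟩ := pvFoldAddFilter
        (fun u => (valL.lookup u).getD 0 == (valL.lookup p.1).getD 0) p.2 g hg
      obtain ⟨c1, c2⟩ := ih _ f2
      refine ⟨fun x => ?_, c2⟩
      rw [c1 x, f1]
      constructor
      · rintro (hx | hx)
        · rcases Finset.mem_union.mp hx with hx | hx
          · exact Or.inl hx
          · simp only [List.mem_toFinset, List.mem_filter] at hx
            exact Or.inr ⟨p, List.mem_cons_self, hcm, hx.1, hx.2⟩
        · rcases hx with ⟨q, hq, hq2, hq3, hq4⟩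
          exact Or.inr ⟨q, List.mem_cons_of_mem _ hq, hq2, hq3, hq4⟩
      · rintro (hx | hx)
        · exact Or.inl (Finset.mem_union_left _ hx)
        · rcases hx with ⟨q, hq, hq2, hq3, hq4⟩
          rcases List.mem_cons.mp hq with hq | hq
          · subst hq
            exact Or.inl (Finset.mem_union_right _ (by
              simp only [List.mem_toFinset, List.mem_filter]
              exact ⟨hq3, hq4⟩))
          · exact Or.inr ⟨q, hq, hq2, hq3, hq4⟩
    · rw [if_neg hc]
      have hcm : p.1 ∉ good := by simpa using hc
      obtain ⟨c1, c2⟩ := ih g hg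
      refine ⟨fun x => ?_, c2⟩
      rw [c1 x]
      constructor
      · rintro (hx | ⟨q, hq, hq2, hq3, hq4⟩)
        · exact Or.inl hx
        · exact Or.inr ⟨q, List.mem_cons_of_mem _ hq, hq2, hq3, hq4⟩
      · rintro (hx | ⟨q, hq, hq2, hq3, hq4⟩)
        · exact Or.inl hx
        · rcases List.mem_cons.mp hq with hq | hq
          · subst hq; exact absurd hq2 hcm
          · exact Or.inr ⟨q, hq, hq2, hq3, hq4⟩

-- with well-formed input, the pass computes exactly one abstract step
theorem pvBRound_toFinset (adjL : List (Int × List Int)) (valL : List (Int × Int))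
    (hnd : (adjL.map Prod.fst).Nodup) (good : List Int) (hg : good.Nodup) :
    (pvBRound adjL valL good).toFinset = pvStep adjL valL good.toFinset ∧
    (pvBRound adjL valL good).Nodup := by
  obtain ⟨c1, c2⟩ := pvBRoundAux valL good adjL good hg
  refine ⟨?_, c2⟩
  ext x
  rw [pvBRound] at *
  rw [c1 x]
  simp only [pvStep, pvImg, Finset.mem_union, Finset.mem_biUnion]
  constructor
  · rintro (hx | ⟨p, hp, hp2, hp3, hp4⟩)
    · exact Or.inl hx
    · refine Or.inr ⟨p.1, by simpa using hp2, ?_⟩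
      simp only [pvOkn, List.mem_toFinset, List.mem_filter]
      have : pvAdj adjL p.1 = p.2 := by
        unfold pvAdj
        rw [pvLookup_of_mem_nodup adjL p hnd hp]
        rfl
      rw [this]
      exact ⟨hp3, hp4⟩
  · rintro (hx | ⟨v, hv, hxv⟩)
    · exact Or.inl hx
    · simp only [pvOkn, List.mem_toFinset, List.mem_filter] at hxv
      right
      unfold pvAdj at hxv
      rcases hlk : adjL.lookup v with _ | ws
      · rw [hlk] at hxv; simp at hxv
      · rw [hlk] at hxv
        exact ⟨(v, ws), pvLookup_mem v ws adjL hlk, by simpa using hv, hxv.1, hxv.2⟩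

theorem pvLv_subset_iter (adjL : List (Int × List Int)) (valL : List (Int × Int)) :
    ∀ k, pvLv adjL ⊆ (pvStep adjL valL)^[k] (pvLv adjL) := by
  intro k
  induction k with
  | zero => simp
  | succ k ih => exact ih.trans (pvIter_chain adjL valL k)

theorem pvIter_mono_le (adjL : List (Int × List Int)) (valL : List (Int × Int))
    {i j : Nat} (h : i ≤ j) :
    (pvStep adjL valL)^[i] (pvLv adjL) ⊆ (pvStep adjL valL)^[j] (pvLv adjL) := by
  induction j with
  | zero => simp [Nat.le_zero.mp h]
  | succ j ih =>
    rcases Nat.lt_or_ge i (j + 1) with hij | hij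
    · exact (ih (Nat.lt_succ_iff.mp hij)).trans (pvIter_chain adjL valL j)
    · have : i = j + 1 := Nat.le_antisymm h hij
      subst this
      exact Finset.Subset.refl _

theorem pvBLoop_eq (adjL : List (Int × List Int)) (valL : List (Int × Int))
    (hnd : (adjL.map Prod.fst).Nodup) :
    ∀ (fuel k : Nat) (g : List Int), g.Nodup →
      g.toFinset = (pvStep adjL valL)^[k] (pvLv adjL) →
      fuel + k = adjL.length →
      (pvBLoop adjL valL g fuel).toFinset = pvCF adjL valL ∧
      (pvBLoop adjL valL g fuel).Nodup := by
  intro fuel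
  induction fuel with
  | zero =>
    intro k g hg hset hfk
    have : k = adjL.length := by omega
    subst this
    exact ⟨hset, hg⟩
  | succ fuel ih =>
    intro k g hg hset hfk
    obtain ⟨d1, d2⟩ := pvBRound_toFinset adjL valL hnd g hg
    simp only [pvBLoop]
    by_cases heq : PySem.Set.equal (pvBRound adjL valL g) g = true
    · rw [if_pos heq]
      have hsame : (pvBRound adjL valL g).toFinset = g.toFinset := by
        ext x
        have := (PySem.Set.equal_iff _ _).mp heq x
        simpa using this
      have hclosed : pvStep adjL valL g.toFinset ⊆ g.toFinset := by
        rw [← d1, hsame]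
      have hlvg : pvLv adjL ⊆ g.toFinset := by
        rw [hset]; exact pvLv_subset_iter adjL valL k
      have hgcf : g.toFinset ⊆ pvCF adjL valL := by
        rw [hset]
        exact pvIter_mono_le adjL valL (by omega)
      exact ⟨pvExit adjL valL g.toFinset hlvg hgcf hclosed, hg⟩
    · rw [if_neg heq]
      refine ih (k + 1) (pvBRound adjL valL g) d2 ?_ (by omega)
      rw [d1, hset, Function.iterate_succ_apply']

-- ---- the degenerate leafless start: both programs keep the empty set ----
theorem pvOfList_nil : PySem.Set.ofList ([] : List Int) = [] := rfl

theorem pvBRound_nil (adjL : List (Int × List Int)) (valL : List (Int × Int)) :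
    pvBRound adjL valL [] = [] := by
  rw [pvBRound]
  induction adjL with
  | nil => rfl
  | cons p l ih => simp

theorem pvBLoop_nil (adjL : List (Int × List Int)) (valL : List (Int × Int)) (fuel : Nat) :
    pvBLoop adjL valL [] fuel = [] := by
  cases fuel with
  | zero => rfl
  | succ fuel =>
    simp only [pvBLoop, pvBRound_nil]
    rfl

-- ===== VERDICT (by name: the statement is the Claim_ definition above) =====
theorem is_sign_harmonic_spec : Claim_equal_is_sign_harmonic := by
  intro adjL valL _ hpre
  unfold Spec_is_sign_harmonic
  obtain ⟨hnd, hleafless | hpre2⟩ := hpre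
  · -- leafless inputs: both sides never visit anything
    have hfil : adjL.filter (fun p => p.2.length == 1) = [] := by
      rw [List.filter_eq_nil_iff]
      intro p hp
      simpa using hleafless p hp
    simp only [is_sign_harmonic, is_sign_harmonic_alt, hfil, List.map_nil, pvOfList_nil,
      pvALoop_nil, pvBLoop_nil]
    exact Bool.beq_comm
  have hpre' : ∀ p ∈ adjL, ∀ u ∈ p.2, u ∈ adjL.map Prod.fst :=
    fun p hp u hu => ((hpre2 p hp).2 u hu).2
  simp only [is_sign_harmonic, is_sign_harmonic_alt]
  set L := PySem.Set.ofList ((adjL.filter (fun p => p.2.length == 1)).map Prod.fst) with hL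
  have hLnd : L.Nodup := PySem.Set.nodup_ofList _
  have hLset : L.toFinset = pvLv adjL := by
    ext x; simp [hL, PySem.Set.mem_ofList, pvLv]
  have hcf_card : (pvCF adjL valL).card ≤ adjL.length := by
    have h1 := Finset.card_le_card (pvCF_subset_keys adjL valL hpre')
    have h2 : (pvKeys adjL).card ≤ adjL.length := by
      calc (pvKeys adjL).card ≤ (adjL.map Prod.fst).length := List.toFinset_card_le _
        _ = adjL.length := List.length_map ..
    omega
  obtain ⟨a1, a2⟩ := pvALoop_eq adjL valL hpre' (adjL.length + 2) L L hLnd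
    (Finset.Subset.refl _)
    (by rw [hLset])
    (by rw [hLset]; exact pvLv_subset_CF adjL valL)
    (by rw [pvStep])
    (fun _ => by omega)
  obtain ⟨b1, b2⟩ := pvBLoop_eq adjL valL hnd adjL.length 0 L hLnd (by simpa using hLset) (by omega)
  have hAlen : (pvALoop adjL valL L L (adjL.length + 2)).length = (pvCF adjL valL).card := by
    rw [← a1]; exact (List.toFinset_card_of_nodup a2).symm
  have hBlen : (pvBLoop adjL valL L adjL.length).length = (pvCF adjL valL).card := by
    rw [← b1]; exact (List.toFinset_card_of_nodup b2).symm
  rw [hAlen, hBlen]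
  exact Bool.beq_comm
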